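-- pv_equiv track=rewrite | github.com/google/storybench | scripts/create_vidln_training_data.py | _match_subseq
-- ===== SOURCE A (Python) =====
-- def _match_subseq(l1, l2):
--     remain1 = set([i for i in range(len(l1)+1)])
--     remain2 = set([i for i in range(len(l2)+1)])
--     res1 = []
--     res2 = []
--     for w in range(len(l1), 0, -1):
--         for st1 in range(0, len(l1)-w+1):
--             # iterate over all possible subseq of length w
--             for st2 in range(0, len(l2)-w+1):
--                 if (st1 in remain1 and st1+w-1 in remain1 and st2 in remain2 and
--                     st2+w-1 in remain2 and l1[st1:st1+w] == l2[st2:st2+w]):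
--                     res1.append((st1, st1+w))
--                     res2.append((st2, st2+w))
--                     for e in range(st1, st1+w):
--                         remain1.remove(e)
--                     for e in range(st2, st2+w):
--                         remain2.remove(e)
--     argsort = sorted(range(len(res1)), key=lambda x: res1[x][0])
--     res1 = [res1[ix] for ix in argsort]
--     res2 = [res2[ix] for ix in argsort]
--     return res1, res2
-- ===== SOURCE B (Python) =====
-- def _match_subseq(l1, l2):
--     n, m = len(l1), len(l2)
--     # rows[i][j] = length of the longest common run of l1[i:] and l2[j:]
--     rows = [[0] * (m + 1)]
--     for i in range(n - 1, -1, -1):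
--         prev = rows[0]
--         rows.insert(0, [prev[j + 1] + 1 if l1[i] == l2[j] else 0
--                         for j in range(m)] + [0])
--     # all candidate matches, widest first, in A's scan order, pre-filtered by the DP table
--     cands = [(w, st1, st2)
--              for w in range(n, 0, -1)
--              for st1 in range(n - w + 1)
--              for st2 in range(m - w + 1)
--              if rows[st1][st2] >= w]
--     used1, used2 = [False] * n, [False] * m
--     pairs = []
--     for w, st1, st2 in cands:
--         if not (used1[st1] or used1[st1 + w - 1] or used2[st2] or used2[st2 + w - 1]):
--             pairs.append(((st1, st1 + w), (st2, st2 + w)))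
--             for e in range(st1, st1 + w):
--                 used1[e] = True
--             for e in range(st2, st2 + w):
--                 used2[e] = True
--     pairs.sort(key=lambda p: p[0][0])
--     return [p for p, _ in pairs], [q for _, q in pairs]
-- ===== Notes on version B (the rewrite author's own statement) =====
-- stated objective: faster
-- what changed: B precomputes a common-run (LCP) DP table, flattens A's three stateful nested loops into one pre-filtered flat candidate list consumed by a single greedy pass over boolean used arrays and zipped result pairs, and sorts the zipped pairs directly instead of argsorting indices.
import Mathlib
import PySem

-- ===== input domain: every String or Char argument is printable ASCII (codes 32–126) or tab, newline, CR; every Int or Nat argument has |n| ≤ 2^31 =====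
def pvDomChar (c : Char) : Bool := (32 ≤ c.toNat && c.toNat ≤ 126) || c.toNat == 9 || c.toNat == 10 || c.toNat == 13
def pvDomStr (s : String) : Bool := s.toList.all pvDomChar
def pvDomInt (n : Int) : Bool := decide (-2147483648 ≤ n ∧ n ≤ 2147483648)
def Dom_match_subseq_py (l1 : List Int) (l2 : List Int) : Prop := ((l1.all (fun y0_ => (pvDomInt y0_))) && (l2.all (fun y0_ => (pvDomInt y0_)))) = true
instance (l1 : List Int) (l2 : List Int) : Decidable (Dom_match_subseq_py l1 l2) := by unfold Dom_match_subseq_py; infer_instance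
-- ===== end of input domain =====

-- B precomputes a common-run DP table, flattens A's three nested loops into one
-- pre-filtered candidate list consumed by a single fold over zipped pairs, and
-- sorts the zipped pairs instead of argsorting indices (faster: no O(w) slice
-- comparison in the inner loop).


-- ===== PORT A =====
-- set.remove is ported as Set.discard: exact here, because the removed index is always
-- still present (the window's endpoints were just checked to be in the set, and every
-- previously removed block is contiguous of width ≥ w, so it cannot lie strictly inside
-- the window); hence Python's set.remove never raises and A is total.
def match_subseq_py (l1 : List Int) (l2 : List Int) : (List (Int × Int)) × (List (Int × Int)) :=
  let n : Int := l1.length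
  let m : Int := l2.length
  let remain1 : PySem.Set Int := PySem.Set.ofList (PySem.List.pyRange 0 (n + 1) 1)
  let remain2 : PySem.Set Int := PySem.Set.ofList (PySem.List.pyRange 0 (m + 1) 1)
  let fin :=
    (PySem.List.pyRange n 0 (-1)).foldl (fun s w =>
      (PySem.List.pyRange 0 (n - w + 1) 1).foldl (fun s st1 =>
        (PySem.List.pyRange 0 (m - w + 1) 1).foldl (fun s st2 =>
          if st1 ∈ s.1 ∧ st1 + w - 1 ∈ s.1 ∧ st2 ∈ s.2.1 ∧ st2 + w - 1 ∈ s.2.1 ∧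
             PySem.List.slice l1 (some st1) (some (st1 + w)) =
               PySem.List.slice l2 (some st2) (some (st2 + w)) then
            ((PySem.List.pyRange st1 (st1 + w) 1).foldl PySem.Set.discard s.1,
             (PySem.List.pyRange st2 (st2 + w) 1).foldl PySem.Set.discard s.2.1,
             s.2.2.1 ++ [(st1, st1 + w)], s.2.2.2 ++ [(st2, st2 + w)])
          else s) s) s)
      (remain1, remain2, ([] : List (Int × Int)), ([] : List (Int × Int)))
  let res1 := fin.2.2.1
  let res2 := fin.2.2.2
  let argsort := PySem.List.sorted (PySem.List.pyRange 0 (res1.length : Int) 1)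
                   (fun x => (PySem.List.pyGetD res1 x (0, 0)).1) false
  (argsort.map (fun ix => PySem.List.pyGetD res1 ix (0, 0)),
   argsort.map (fun ix => PySem.List.pyGetD res2 ix (0, 0)))

-- ===== PORT B =====
-- rows of Source B's DP table: pvRows l2 l1' is the list of rows for the suffixes of l1'
-- (Source B builds the same list bottom-up, inserting each new row in front).
def pvRows (l2 : List Int) : List Int → List (List Nat)
  | [] => [List.replicate (l2.length + 1) 0]
  | a :: rest =>
      let rs := pvRows l2 rest
      let prev := rs.headD []
      ((List.range l2.length).map (fun j =>
          if a = l2.getD j 0 then prev.getD (j + 1) 0 + 1 else 0) ++ [0]) :: rs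

def match_subseq_py_alt (l1 : List Int) (l2 : List Int) : (List (Int × Int)) × (List (Int × Int)) :=
  let n : Int := l1.length
  let m : Int := l2.length
  let rows := pvRows l2 l1
  -- Source B's candidate comprehension: widest first, pre-filtered by the DP table
  let cands : List (Int × Int × Int) :=
    (PySem.List.pyRange n 0 (-1)).flatMap (fun w =>
      (PySem.List.pyRange 0 (n - w + 1) 1).flatMap (fun st1 =>
        ((PySem.List.pyRange 0 (m - w + 1) 1).filter
            (fun st2 => w ≤ (((rows.getD st1.toNat []).getD st2.toNat 0 : Nat) : Int))).map
          (fun st2 => (w, st1, st2))))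
  let fin := cands.foldl (fun s c =>
      if (s.1.getD c.2.1.toNat false || s.1.getD (c.2.1 + c.1 - 1).toNat false ||
          s.2.1.getD c.2.2.toNat false || s.2.1.getD (c.2.2 + c.1 - 1).toNat false) = false then
        ((PySem.List.pyRange c.2.1 (c.2.1 + c.1) 1).foldl (fun u e => PySem.List.pySetD u e true) s.1,
         (PySem.List.pyRange c.2.2 (c.2.2 + c.1) 1).foldl (fun u e => PySem.List.pySetD u e true) s.2.1,
         s.2.2 ++ [((c.2.1, c.2.1 + c.1), (c.2.2, c.2.2 + c.1))])
      else s)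
    (List.replicate l1.length false, List.replicate l2.length false,
     ([] : List ((Int × Int) × (Int × Int))))
  let pairs := PySem.List.sorted fin.2.2 (fun p => p.1.1) false
  (pairs.map Prod.fst, pairs.map Prod.snd)

-- ===== PRECONDITION & SPEC =====
def Spec_match_subseq_py (l1 : List Int) (l2 : List Int) (out : (List (Int × Int)) × (List (Int × Int))) : Prop := out = match_subseq_py_alt l1 l2
instance (l1 : List Int) (l2 : List Int) (out : (List (Int × Int)) × (List (Int × Int))) : Decidable (Spec_match_subseq_py l1 l2 out) := by unfold Spec_match_subseq_py; infer_instance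

-- ===== CLAIM (what is proved, stated in full; the proofs are below) =====
def Claim_equal_match_subseq_py : Prop := ∀ (l1 : List Int) (l2 : List Int), Dom_match_subseq_py l1 l2 → Spec_match_subseq_py l1 l2 (match_subseq_py l1 l2)

-- ===== LEMMAS AND PROOFS =====

-- common-run length of two lists (length of the longest common prefix run)
def cRun : List Int → List Int → Nat
  | a :: xs, b :: ys => if a = b then cRun xs ys + 1 else 0
  | _, _ => 0

-- relation between A's remain set and B's used array
def RS (len : Nat) (r : PySem.Set Int) (u : List Bool) : Prop :=
  u.length = len ∧
  ∀ i : Int, i ∈ r ↔ 0 ≤ i ∧ i ≤ len ∧ (i = len ∨ u.getD i.toNat false = false)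

def pvR (n m : Nat)
    (sA : PySem.Set Int × PySem.Set Int × List (Int × Int) × List (Int × Int))
    (sB : List Bool × List Bool × List ((Int × Int) × (Int × Int))) : Prop :=
  RS n sA.1 sB.1 ∧ RS m sA.2.1 sB.2.1 ∧
  sA.2.2.1 = sB.2.2.map Prod.fst ∧ sA.2.2.2 = sB.2.2.map Prod.snd

theorem foldl_rel {α β γ : Type} (R : α → β → Prop) (f : α → γ → α) (g : β → γ → β) :
    ∀ (l : List γ) (a : α) (b : β), R a b →
      (∀ a b c, c ∈ l → R a b → R (f a c) (g b c)) →
      R (l.foldl f a) (l.foldl g b) := by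
  intro l
  induction l with
  | nil => intro a b h _; exact h
  | cons c cs ih =>
      intro a b h hstep
      exact ih (f a c) (g b c) (hstep a b c (by simp) h)
        (fun a b c' hc' => hstep a b c' (by simp [hc']))

theorem getD_replicate_false (k t : Nat) : (List.replicate k false).getD t false = false := by
  rcases lt_or_ge t k with h | h
  · simp [List.getD_eq_getElem?_getD, h]
  · rw [List.getD_eq_getElem?_getD, List.getElem?_eq_none_iff.mpr (by simpa using h)]
    rfl

theorem RS_init (len : Nat) :
    RS len (PySem.Set.ofList (PySem.List.pyRange 0 ((len : Int) + 1) 1)) (List.replicate len false) := by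
  constructor
  · simp
  · intro i
    rw [PySem.Set.mem_ofList, PySem.List.mem_pyRange_one]
    constructor
    · intro h
      refine ⟨h.1, by omega, ?_⟩
      right; exact getD_replicate_false len i.toNat
    · intro h; exact ⟨h.1, by omega⟩

theorem mem_foldl_discard (es : List Int) :
    ∀ (r : PySem.Set Int) (i : Int),
      i ∈ es.foldl PySem.Set.discard r ↔ i ∈ r ∧ i ∉ es := by
  induction es with
  | nil => simp
  | cons e es ih =>
      intro r i
      simp only [List.foldl_cons, ih, PySem.Set.mem_discard, List.mem_cons]
      tauto

theorem length_foldl_set (es : List Int) :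
    ∀ (u : List Bool), (es.foldl (fun u e => PySem.List.pySetD u e true) u).length = u.length := by
  induction es with
  | nil => intro u; rfl
  | cons e es ih => intro u; simp [ih, PySem.List.length_pySetD]

theorem getD_set_bool (u : List Bool) (t : Nat) (ht : t < u.length) (k : Nat) :
    (u.set t true).getD k false = if k = t then true else u.getD k false := by
  rcases eq_or_ne k t with h | h
  · subst h; simp [List.getD_eq_getElem?_getD, ht]
  · have ht' : ¬ (t = k) := fun hh => h hh.symm
    simp [List.getD_eq_getElem?_getD, ht', h]

theorem getD_foldl_set (es : List Int) :
    ∀ (u : List Bool), (∀ e ∈ es, 0 ≤ e ∧ e < u.length) → ∀ (k : Nat),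
      (es.foldl (fun u e => PySem.List.pySetD u e true) u).getD k false =
        if (k : Int) ∈ es then true else u.getD k false := by
  induction es with
  | nil => simp
  | cons e es ih =>
      intro u hb k
      have he := hb e (by simp)
      have hset : PySem.List.pySetD u e true = u.set e.toNat true :=
        PySem.List.pySetD_of_nonneg u true he.1
      simp only [List.foldl_cons]
      rw [ih _ (fun e' he' => by
            have := hb e' (by simp [he'])
            simpa [hset, List.length_set] using this) k]
      rw [hset, getD_set_bool u e.toNat (by omega) k]
      by_cases hk : (k : Int) ∈ es <;> by_cases hke : (k : Int) = e <;>
        simp [hk, hke, show (k = e.toNat) ↔ ((k : Int) = e) by omega]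

-- the DP table of B computes cRun of the suffixes
theorem rows_getD (l2 : List Int) :
    ∀ (l1 : List Int) (i j : Nat), i ≤ l1.length → j ≤ l2.length →
      ((pvRows l2 l1).getD i []).getD j 0 = cRun (l1.drop i) (l2.drop j) := by
  intro l1
  induction l1 with
  | nil =>
      intro i j hi hj
      have hii : i = 0 := by simpa using hi
      subst hii
      simp [pvRows, cRun]
  | cons a rest ih =>
      intro i j hi hj
      cases i with
      | zero =>
          have hhead : ∀ (l : List (List Nat)), l.headD [] = l.getD 0 [] := by
            intro l; cases l <;> rfl
          simp only [pvRows, List.getD_cons_zero]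
          rcases lt_or_ge j l2.length with hj' | hj'
          · have hget : (((List.range l2.length).map (fun j =>
                if a = l2.getD j 0 then ((pvRows l2 rest).headD []).getD (j + 1) 0 + 1 else 0)) ++ [0]).getD j 0
                = if a = l2.getD j 0 then ((pvRows l2 rest).headD []).getD (j + 1) 0 + 1 else 0 := by
              rw [List.getD_eq_getElem?_getD, List.getElem?_append_left (by simpa using hj')]
              simp [hj']
            rw [hget, hhead, ih 0 (j+1) (by simp) (by omega)]
            rw [List.drop_eq_getElem_cons hj']
            simp only [List.drop_zero, cRun]
            rw [List.getD_eq_getElem _ _ hj']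
          · have hj'' : j = l2.length := by omega
            subst hj''
            rw [List.getD_eq_getElem?_getD, List.getElem?_append_right (by simp)]
            simp [cRun, List.drop_length]
      | succ i' =>
          simpa [pvRows] using ih i' j (by simpa using hi) hj

theorem take_eq_iff_cRun (w : Nat) :
    ∀ (xs ys : List Int), w ≤ xs.length → w ≤ ys.length →
      (xs.take w = ys.take w ↔ w ≤ cRun xs ys) := by
  induction w with
  | zero => intro xs ys _ _; simp
  | succ w ih =>
      intro xs ys hx hy
      cases xs with
      | nil => simp at hx
      | cons a xs' =>
        cases ys with
        | nil => simp at hy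
        | cons b ys' =>
            simp only [List.take_succ_cons, List.cons_eq_cons, cRun]
            rcases eq_or_ne a b with h | h
            · simp [h, ih xs' ys' (by simpa using hx) (by simpa using hy)]
            · simp [h]

theorem RS_update (len : Nat) (r : PySem.Set Int) (u : List Bool) (h : RS len r u)
    (a b : Int) (ha : 0 ≤ a) (hb : b ≤ (len : Int)) :
    RS len ((PySem.List.pyRange a b 1).foldl PySem.Set.discard r)
      ((PySem.List.pyRange a b 1).foldl (fun u e => PySem.List.pySetD u e true) u) := by
  obtain ⟨hlen, hmem⟩ := h
  have hbnd : ∀ e ∈ PySem.List.pyRange a b 1, 0 ≤ e ∧ e < (u.length : Int) := by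
    intro e he
    rw [PySem.List.mem_pyRange_one] at he
    omega
  constructor
  · rw [length_foldl_set]; exact hlen
  · intro i
    rw [mem_foldl_discard, hmem]
    constructor
    · rintro ⟨⟨hi0, hile, hor⟩, hnotin⟩
      refine ⟨hi0, hile, ?_⟩
      rcases hor with h | h
      · exact Or.inl h
      · right
        rw [getD_foldl_set _ _ hbnd, if_neg]
        · exact h
        · intro hmem'
          exact hnotin (by simpa [Int.toNat_of_nonneg hi0] using hmem')
    · rintro ⟨hi0, hile, hor⟩
      rcases hor with h | h
      · refine ⟨⟨hi0, hile, Or.inl h⟩, ?_⟩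
        rw [PySem.List.mem_pyRange_one]
        omega
      · rw [getD_foldl_set _ _ hbnd] at h
        by_cases hin : ((i.toNat : Int)) ∈ PySem.List.pyRange a b 1
        · rw [if_pos hin] at h; exact absurd h (by simp)
        · rw [if_neg hin] at h
          refine ⟨⟨hi0, hile, Or.inr h⟩, ?_⟩
          intro hmem'
          exact hin (by simpa [Int.toNat_of_nonneg hi0] using hmem')

theorem slice_iff (l1 l2 : List Int) (w st1 st2 : Int) (hw : 0 < w)
    (h1a : 0 ≤ st1) (h1b : st1 + w ≤ (l1.length : Int))
    (h2a : 0 ≤ st2) (h2b : st2 + w ≤ (l2.length : Int)) :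
    (PySem.List.slice l1 (some st1) (some (st1 + w)) =
       PySem.List.slice l2 (some st2) (some (st2 + w)))
      ↔ w ≤ ((((pvRows l2 l1).getD st1.toNat []).getD st2.toNat 0 : Nat) : Int) := by
  rw [PySem.List.slice_toNat l1 h1a (by omega), PySem.List.slice_toNat l2 h2a (by omega)]
  have e1 : (st1 + w).toNat - st1.toNat = w.toNat := by omega
  have e2 : (st2 + w).toNat - st2.toNat = w.toNat := by omega
  rw [e1, e2,
    take_eq_iff_cRun w.toNat _ _ (by rw [List.length_drop]; omega) (by rw [List.length_drop]; omega),
    rows_getD l2 l1 st1.toNat st2.toNat (by omega) (by omega)]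
  omega

-- one inner step: A's guarded update vs B's filter-then-guarded update
theorem step_preserve (l1 l2 : List Int) (w st1 st2 : Int)
    (hw : 0 < w) (_hwn : w ≤ (l1.length : Int))
    (h1a : 0 ≤ st1) (h1b : st1 < (l1.length : Int) - w + 1)
    (h2a : 0 ≤ st2) (h2b : st2 < (l2.length : Int) - w + 1)
    (sA : PySem.Set Int × PySem.Set Int × List (Int × Int) × List (Int × Int))
    (sB : List Bool × List Bool × List ((Int × Int) × (Int × Int)))
    (hR : pvR l1.length l2.length sA sB) :
    pvR l1.length l2.length
      (if st1 ∈ sA.1 ∧ st1 + w - 1 ∈ sA.1 ∧ st2 ∈ sA.2.1 ∧ st2 + w - 1 ∈ sA.2.1 ∧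
          PySem.List.slice l1 (some st1) (some (st1 + w)) =
            PySem.List.slice l2 (some st2) (some (st2 + w)) then
        ((PySem.List.pyRange st1 (st1 + w) 1).foldl PySem.Set.discard sA.1,
         (PySem.List.pyRange st2 (st2 + w) 1).foldl PySem.Set.discard sA.2.1,
         sA.2.2.1 ++ [(st1, st1 + w)], sA.2.2.2 ++ [(st2, st2 + w)])
       else sA)
      (if w ≤ ((((pvRows l2 l1).getD st1.toNat []).getD st2.toNat 0 : Nat) : Int) then
        (if (sB.1.getD st1.toNat false || sB.1.getD (st1 + w - 1).toNat false ||
             sB.2.1.getD st2.toNat false || sB.2.1.getD (st2 + w - 1).toNat false) = false then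
          ((PySem.List.pyRange st1 (st1 + w) 1).foldl (fun u e => PySem.List.pySetD u e true) sB.1,
           (PySem.List.pyRange st2 (st2 + w) 1).foldl (fun u e => PySem.List.pySetD u e true) sB.2.1,
           sB.2.2 ++ [((st1, st1 + w), (st2, st2 + w))])
         else sB)
       else sB) := by
  obtain ⟨⟨hlen1, hmem1⟩, ⟨hlen2, hmem2⟩, hres1, hres2⟩ := hR
  have mem_iff : ∀ (len : Nat) (r : PySem.Set Int) (u : List Bool),
      u.length = len → (∀ i : Int, i ∈ r ↔ 0 ≤ i ∧ i ≤ len ∧ (i = len ∨ u.getD i.toNat false = false)) →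
      ∀ i : Int, 0 ≤ i → i < (len : Int) → ((i ∈ r) ↔ u.getD i.toNat false = false) := by
    intro len r u _ hmem i hi0 hilt
    rw [hmem i]
    constructor
    · rintro ⟨_, _, h | h⟩
      · omega
      · exact h
    · intro h; exact ⟨hi0, by omega, Or.inr h⟩
  have e1 := mem_iff _ _ _ hlen1 hmem1 st1 h1a (by omega)
  have e2 := mem_iff _ _ _ hlen1 hmem1 (st1 + w - 1) (by omega) (by omega)
  have e3 := mem_iff _ _ _ hlen2 hmem2 st2 h2a (by omega)
  have e4 := mem_iff _ _ _ hlen2 hmem2 (st2 + w - 1) (by omega) (by omega)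
  have e5 := slice_iff l1 l2 w st1 st2 hw h1a (by omega) h2a (by omega)
  by_cases hc : st1 ∈ sA.1 ∧ st1 + w - 1 ∈ sA.1 ∧ st2 ∈ sA.2.1 ∧ st2 + w - 1 ∈ sA.2.1 ∧
      PySem.List.slice l1 (some st1) (some (st1 + w)) =
        PySem.List.slice l2 (some st2) (some (st2 + w))
  · obtain ⟨c1, c2, c3, c4, c5⟩ := hc
    rw [if_pos ⟨c1, c2, c3, c4, c5⟩, if_pos (e5.mp c5), if_pos (by
      rw [e1.mp c1, e2.mp c2, e3.mp c3, e4.mp c4]; rfl)]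
    refine ⟨?_, ?_, ?_, ?_⟩
    · exact RS_update _ _ _ ⟨hlen1, hmem1⟩ st1 (st1 + w) h1a (by omega)
    · exact RS_update _ _ _ ⟨hlen2, hmem2⟩ st2 (st2 + w) h2a (by omega)
    · simp [hres1]
    · simp [hres2]
  · have hkeep : pvR l1.length l2.length sA sB :=
      ⟨⟨hlen1, hmem1⟩, ⟨hlen2, hmem2⟩, hres1, hres2⟩
    rw [if_neg hc]
    by_cases hrow : w ≤ ((((pvRows l2 l1).getD st1.toNat []).getD st2.toNat 0 : Nat) : Int)
    · rw [if_pos hrow, if_neg (by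
        intro hor
        have hor' := hor
        simp only [Bool.or_eq_false_iff] at hor'
        exact hc ⟨e1.mpr hor'.1.1.1, e2.mpr hor'.1.1.2, e3.mpr hor'.1.2,
          e4.mpr hor'.2, e5.mpr hrow⟩)]
      exact hkeep
    · rw [if_neg hrow]; exact hkeep

theorem fold_rel_main (l1 l2 : List Int) :
    pvR l1.length l2.length
      ((PySem.List.pyRange (l1.length : Int) 0 (-1)).foldl (fun s w =>
        (PySem.List.pyRange 0 ((l1.length : Int) - w + 1) 1).foldl (fun s st1 =>
          (PySem.List.pyRange 0 ((l2.length : Int) - w + 1) 1).foldl (fun s st2 =>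
            if st1 ∈ s.1 ∧ st1 + w - 1 ∈ s.1 ∧ st2 ∈ s.2.1 ∧ st2 + w - 1 ∈ s.2.1 ∧
               PySem.List.slice l1 (some st1) (some (st1 + w)) =
                 PySem.List.slice l2 (some st2) (some (st2 + w)) then
              ((PySem.List.pyRange st1 (st1 + w) 1).foldl PySem.Set.discard s.1,
               (PySem.List.pyRange st2 (st2 + w) 1).foldl PySem.Set.discard s.2.1,
               s.2.2.1 ++ [(st1, st1 + w)], s.2.2.2 ++ [(st2, st2 + w)])
            else s) s) s)
        (PySem.Set.ofList (PySem.List.pyRange 0 ((l1.length : Int) + 1) 1),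
         PySem.Set.ofList (PySem.List.pyRange 0 ((l2.length : Int) + 1) 1),
         ([] : List (Int × Int)), ([] : List (Int × Int))))
      ((PySem.List.pyRange (l1.length : Int) 0 (-1)).foldl (fun s w =>
        (PySem.List.pyRange 0 ((l1.length : Int) - w + 1) 1).foldl (fun s st1 =>
          (PySem.List.pyRange 0 ((l2.length : Int) - w + 1) 1).foldl (fun s st2 =>
            if w ≤ ((((pvRows l2 l1).getD st1.toNat []).getD st2.toNat 0 : Nat) : Int) then
              (if (s.1.getD st1.toNat false || s.1.getD (st1 + w - 1).toNat false ||
                   s.2.1.getD st2.toNat false || s.2.1.getD (st2 + w - 1).toNat false) = false then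
                ((PySem.List.pyRange st1 (st1 + w) 1).foldl (fun u e => PySem.List.pySetD u e true) s.1,
                 (PySem.List.pyRange st2 (st2 + w) 1).foldl (fun u e => PySem.List.pySetD u e true) s.2.1,
                 s.2.2 ++ [((st1, st1 + w), (st2, st2 + w))])
               else s)
             else s) s) s)
        (List.replicate l1.length false, List.replicate l2.length false,
         ([] : List ((Int × Int) × (Int × Int))))) := by
  apply foldl_rel
  · exact ⟨RS_init l1.length, RS_init l2.length, rfl, rfl⟩
  · intro a b w hwmem hR
    rw [PySem.List.mem_pyRange_neg_one] at hwmem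
    apply foldl_rel
    · exact hR
    · intro a b st1 h1mem hR
      rw [PySem.List.mem_pyRange_one] at h1mem
      apply foldl_rel
      · exact hR
      · intro a b st2 h2mem hR
        rw [PySem.List.mem_pyRange_one] at h2mem
        exact step_preserve l1 l2 w st1 st2 (by omega) (by omega) (by omega) (by omega)
          (by omega) (by omega) a b hR

-- B's fold over the flattened, pre-filtered candidate list IS the nested guarded fold
theorem alt_fold_flatten (l1 l2 : List Int)
    (init : List Bool × List Bool × List ((Int × Int) × (Int × Int))) :
    ((PySem.List.pyRange (l1.length : Int) 0 (-1)).flatMap (fun w =>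
      (PySem.List.pyRange 0 ((l1.length : Int) - w + 1) 1).flatMap (fun st1 =>
        ((PySem.List.pyRange 0 ((l2.length : Int) - w + 1) 1).filter
            (fun st2 => w ≤ ((((pvRows l2 l1).getD st1.toNat []).getD st2.toNat 0 : Nat) : Int))).map
          (fun st2 => (w, st1, st2))))).foldl (fun s c =>
      if (s.1.getD c.2.1.toNat false || s.1.getD (c.2.1 + c.1 - 1).toNat false ||
          s.2.1.getD c.2.2.toNat false || s.2.1.getD (c.2.2 + c.1 - 1).toNat false) = false then
        ((PySem.List.pyRange c.2.1 (c.2.1 + c.1) 1).foldl (fun u e => PySem.List.pySetD u e true) s.1,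
         (PySem.List.pyRange c.2.2 (c.2.2 + c.1) 1).foldl (fun u e => PySem.List.pySetD u e true) s.2.1,
         s.2.2 ++ [((c.2.1, c.2.1 + c.1), (c.2.2, c.2.2 + c.1))])
      else s) init =
    (PySem.List.pyRange (l1.length : Int) 0 (-1)).foldl (fun s w =>
      (PySem.List.pyRange 0 ((l1.length : Int) - w + 1) 1).foldl (fun s st1 =>
        (PySem.List.pyRange 0 ((l2.length : Int) - w + 1) 1).foldl (fun s st2 =>
          if w ≤ ((((pvRows l2 l1).getD st1.toNat []).getD st2.toNat 0 : Nat) : Int) then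
            (if (s.1.getD st1.toNat false || s.1.getD (st1 + w - 1).toNat false ||
                 s.2.1.getD st2.toNat false || s.2.1.getD (st2 + w - 1).toNat false) = false then
              ((PySem.List.pyRange st1 (st1 + w) 1).foldl (fun u e => PySem.List.pySetD u e true) s.1,
               (PySem.List.pyRange st2 (st2 + w) 1).foldl (fun u e => PySem.List.pySetD u e true) s.2.1,
               s.2.2 ++ [((st1, st1 + w), (st2, st2 + w))])
             else s)
           else s) s) s) init := by
  rw [List.foldl_flatMap]
  apply PySem.List.foldl_congr_mem
  intro s w _
  rw [List.foldl_flatMap]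
  apply PySem.List.foldl_congr_mem
  intro s st1 _
  rw [List.foldl_map, ← PySem.List.foldl_if_eq_foldl_filter]
  apply PySem.List.foldl_congr_mem
  intro s st2 _
  by_cases h : w ≤ ((((pvRows l2 l1).getD st1.toNat []).getD st2.toNat 0 : Nat) : Int)
  · rw [if_pos (by simpa using h), if_pos h]
  · rw [if_neg (by simpa using h), if_neg h]

-- stable sort commutes with map when the key factors through the map
theorem map_insertBy {α β : Type} (f : α → β) (bf : α → α → Bool) (bg : β → β → Bool)
    (hb : ∀ a a', bg (f a) (f a') = bf a a') (x : α) :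
    ∀ (ys : List α), (PySem.List.insertBy bf x ys).map f =
      PySem.List.insertBy bg (f x) (ys.map f) := by
  intro ys
  induction ys with
  | nil => simp [PySem.List.insertBy]
  | cons y ys ih =>
      simp only [PySem.List.insertBy, List.map_cons, hb]
      by_cases h : bf x y = true <;> simp [h, ih]

theorem sorted_map_comm {α β κ : Type} [LT κ] [DecidableLT κ]
    (f : α → β) (key : β → κ) (l : List α) :
    PySem.List.sorted (l.map f) key false =
      (PySem.List.sorted l (fun x => key (f x)) false).map f := by
  rw [PySem.List.sorted_eq_foldl_insertBy, PySem.List.sorted_eq_foldl_insertBy]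
  suffices h : ∀ (acc : List α),
      (l.map f).foldl (fun acc y => PySem.List.insertBy (fun a b => decide (key a < key b)) y acc) (acc.map f)
        = (l.foldl (fun acc x => PySem.List.insertBy (fun a b => decide (key (f a) < key (f b))) x acc) acc).map f by
    simpa using h []
  induction l with
  | nil => intro acc; simp
  | cons x xs ih =>
      intro acc
      simp only [List.map_cons, List.foldl_cons]
      rw [← map_insertBy f _ _ (fun a a' => rfl) x acc, ih]

theorem tail_eq (prs : List ((Int × Int) × (Int × Int))) :
    ((PySem.List.sorted (PySem.List.pyRange 0 (((prs.map Prod.fst).length : Int)) 1)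
        (fun x => (PySem.List.pyGetD (prs.map Prod.fst) x (0, 0)).1) false).map
        (fun ix => PySem.List.pyGetD (prs.map Prod.fst) ix (0, 0)),
     (PySem.List.sorted (PySem.List.pyRange 0 (((prs.map Prod.fst).length : Int)) 1)
        (fun x => (PySem.List.pyGetD (prs.map Prod.fst) x (0, 0)).1) false).map
        (fun ix => PySem.List.pyGetD (prs.map Prod.snd) ix (0, 0)))
    = ((PySem.List.sorted prs (fun p => p.1.1) false).map Prod.fst,
       (PySem.List.sorted prs (fun p => p.1.1) false).map Prod.snd) := by
  have hg1 : ∀ ix : Int, PySem.List.pyGetD (prs.map Prod.fst) ix (0, 0) =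
      (PySem.List.pyGetD prs ix ((0, 0), (0, 0))).1 := fun ix =>
    PySem.List.pyGetD_map Prod.fst prs ix ((0, 0), (0, 0))
  have hg2 : ∀ ix : Int, PySem.List.pyGetD (prs.map Prod.snd) ix (0, 0) =
      (PySem.List.pyGetD prs ix ((0, 0), (0, 0))).2 := fun ix =>
    PySem.List.pyGetD_map Prod.snd prs ix ((0, 0), (0, 0))
  simp only [hg1, hg2, List.length_map]
  conv_rhs => rw [show prs = (PySem.List.pyRange 0 ((prs.length : Int)) 1).map
      (fun j => PySem.List.pyGetD prs j ((0, 0), (0, 0))) from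
    (PySem.List.map_pyGetD_pyRange_zero' prs ((0, 0), (0, 0))).symm]
  rw [sorted_map_comm (fun j => PySem.List.pyGetD prs j ((0, 0), (0, 0))) (fun p => p.1.1)]
  simp [List.map_map, Function.comp]

theorem match_subseq_py_eq_alt (l1 l2 : List Int) :
    match_subseq_py l1 l2 = match_subseq_py_alt l1 l2 := by
  obtain ⟨-, -, h1, h2⟩ := fold_rel_main l1 l2
  simp only [match_subseq_py, match_subseq_py_alt]
  rw [alt_fold_flatten, h1, h2]
  exact tail_eq _

-- ===== VERDICT (by name: the statement is the Claim_ definition above) =====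
theorem match_subseq_py_spec : Claim_equal_match_subseq_py := by
  intro l1 l2 _
  exact match_subseq_py_eq_alt l1 l2
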